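-- pv_equiv track=rewrite | github.com/micmaas2/project-manager | scripts/cross-kanban.py | _build_project_section
-- ===== SOURCE A (Python) =====
-- _STATUS_ORDER = ["paused", "in_progress", "review", "test", "pending"]
--
-- def _status_rank(task: dict) -> tuple:
--     """Sort key: status display order, then oldest created date first."""
--     status = task.get("status", "")
--     rank = _STATUS_ORDER.index(status) if status in _STATUS_ORDER else 99
--     return (rank, task.get("created", "9999-99-99"))
--
-- def _build_project_section(project: str, tasks: list[dict]) -> str:
--     """Return a markdown section for one project's active tasks."""
--     sorted_tasks = sorted(tasks, key=_status_rank)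
--     lines = [
--         f"### {project}",
--         "",
--         "| Status | Task ID | Title |",
--         "|---|---|---|",
--     ]
--     for t in sorted_tasks:
--         title = t.get("title", "—").replace("|", "\\|")
--         status = t.get("status", "—")
--         task_id = t.get("id", "—")
--         lines.append(f"| {status} | {task_id} | {title} |")
--     return "\n".join(lines)
-- ===== SOURCE B (Python) =====
-- _STATUS_ORDER = ["paused", "in_progress", "review", "test", "pending"]
--
--
-- def _build_project_section(project: str, tasks: list) -> str:
--     """Bucket tasks by status (known statuses in display order, then the rest),
--     sort each bucket by created date only, and render the markdown table."""
--     def _created(t):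
--         return t.get("created", "9999-99-99")
--
--     ordered = []
--     for status in _STATUS_ORDER:
--         bucket = [t for t in tasks if t.get("status", "") == status]
--         ordered.extend(sorted(bucket, key=_created))
--     rest = [t for t in tasks if t.get("status", "") not in _STATUS_ORDER]
--     ordered.extend(sorted(rest, key=_created))
--
--     rows = [
--         "| {} | {} | {} |".format(
--             t.get("status", "—"),
--             t.get("id", "—"),
--             t.get("title", "—").replace("|", "\\|"),
--         )
--         for t in ordered
--     ]
--     header = [
--         f"### {project}",
--         "",
--         "| Status | Task ID | Title |",
--         "|---|---|---|",
--     ]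
--     return "\n".join(header + rows)
-- ===== Notes on version B (the rewrite author's own statement) =====
-- stated objective: alternative
-- what changed: Replaces the single comparison sort on the composite (status-rank, created) key with a bucketing decomposition: one bucket per known status in display order plus a catch-all, each bucket sorted by created date only, concatenated; rows are built by a comprehension instead of an append loop.
import Mathlib
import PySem

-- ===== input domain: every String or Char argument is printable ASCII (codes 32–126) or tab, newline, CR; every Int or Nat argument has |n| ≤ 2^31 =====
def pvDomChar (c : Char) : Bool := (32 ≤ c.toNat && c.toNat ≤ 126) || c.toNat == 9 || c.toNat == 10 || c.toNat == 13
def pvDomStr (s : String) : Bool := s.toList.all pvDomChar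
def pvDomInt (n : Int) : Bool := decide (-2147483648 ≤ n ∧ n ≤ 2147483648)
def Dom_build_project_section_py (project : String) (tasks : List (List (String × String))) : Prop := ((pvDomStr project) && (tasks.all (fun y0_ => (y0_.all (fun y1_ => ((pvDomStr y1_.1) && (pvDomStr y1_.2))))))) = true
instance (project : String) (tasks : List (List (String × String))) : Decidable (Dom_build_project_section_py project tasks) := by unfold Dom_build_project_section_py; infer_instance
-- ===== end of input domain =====

-- B buckets tasks by status (known statuses in display order, then a catch-all) and sorts each
-- bucket by created date only, instead of A's single composite-key sort; same output.

-- ===== PORT A =====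
def pvStatusOrder : List String := ["paused", "in_progress", "review", "test", "pending"]

-- _status_rank: (rank, created); 'status in _STATUS_ORDER ? index : 99' ported as a match on index?
def pvRankA (t : List (String × String)) : Nat :=
  match PySem.List.index? pvStatusOrder (PySem.Dict.getD ⟨t⟩ "status" "") with
  | some i => i
  | none => 99

def pvCreatedA (t : List (String × String)) : String :=
  PySem.Dict.getD ⟨t⟩ "created" "9999-99-99"

-- the f-string row (f-string concatenation of string pieces is exact as ++)
def pvRowA (t : List (String × String)) : String :=
  "| " ++ PySem.Dict.getD ⟨t⟩ "status" "—" ++ " | " ++ PySem.Dict.getD ⟨t⟩ "id" "—" ++ " | "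
    ++ PySem.Str.replace (PySem.Dict.getD ⟨t⟩ "title" "—") "|" "\\|" ++ " |"

def build_project_section_py (project : String) (tasks : List (List (String × String))) : String :=
  let sorted_tasks := PySem.List.sorted2 tasks pvRankA pvCreatedA false
  let lines : List String :=
    ["### " ++ project, "", "| Status | Task ID | Title |", "|---|---|---|"]
  let lines := sorted_tasks.foldl (fun acc t => acc ++ [pvRowA t]) lines
  PySem.Str.join "\n" lines

-- ===== PORT B =====
def pvCreatedB (t : List (String × String)) : String :=
  PySem.Dict.getD ⟨t⟩ "created" "9999-99-99"

def pvRowB (t : List (String × String)) : String :=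
  "| " ++ PySem.Dict.getD ⟨t⟩ "status" "—" ++ " | " ++ PySem.Dict.getD ⟨t⟩ "id" "—" ++ " | "
    ++ PySem.Str.replace (PySem.Dict.getD ⟨t⟩ "title" "—") "|" "\\|" ++ " |"

-- one bucket per known status, each sorted by created only
def pvBucketB (tasks : List (List (String × String))) (status : String) : List (List (String × String)) :=
  PySem.List.sorted (tasks.filter (fun t => PySem.Dict.getD ⟨t⟩ "status" "" == status)) pvCreatedB false

def pvOrderedB (tasks : List (List (String × String))) : List (List (String × String)) :=
  (pvStatusOrder.map (pvBucketB tasks)).flatten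
    ++ PySem.List.sorted
        (tasks.filter (fun t => !(pvStatusOrder.contains (PySem.Dict.getD ⟨t⟩ "status" ""))))
        pvCreatedB false

def build_project_section_py_alt (project : String) (tasks : List (List (String × String))) : String :=
  let rows := (pvOrderedB tasks).map pvRowB
  let header : List String :=
    ["### " ++ project, "", "| Status | Task ID | Title |", "|---|---|---|"]
  PySem.Str.join "\n" (header ++ rows)

-- ===== PRECONDITION & SPEC =====
def Spec_build_project_section_py (project : String) (tasks : List (List (String × String))) (out : String) : Prop := out = build_project_section_py_alt project tasks
instance (project : String) (tasks : List (List (String × String))) (out : String) : Decidable (Spec_build_project_section_py project tasks out) := by unfold Spec_build_project_section_py; infer_instance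

-- ===== CLAIM (what is proved, stated in full; the proofs are below) =====
def Claim_equal_build_project_section_py : Prop := ∀ (project : String) (tasks : List (List (String × String))), Dom_build_project_section_py project tasks → Spec_build_project_section_py project tasks (build_project_section_py project tasks)

-- ===== LEMMAS AND PROOFS =====

-- insertBy skips a prefix on which `before x` is false
theorem pv_insertBy_append_left {α : Type} (before : α → α → Bool) (x : α)
    (l t : List α) (h : ∀ y ∈ l, before x y = false) :
    PySem.List.insertBy before x (l ++ t) = l ++ PySem.List.insertBy before x t := by
  induction l with
  | nil => simp
  | cons z zs ih =>
    simp only [List.cons_append, PySem.List.insertBy]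
    rw [h z (by simp)]
    simp [ih (fun y hy => h y (by simp [hy]))]

-- insertBy lands before a suffix on which `before x` is true
theorem pv_insertBy_append_right {α : Type} (before : α → α → Bool) (x : α)
    (l t : List α) (h : ∀ y ∈ t, before x y = true) :
    PySem.List.insertBy before x (l ++ t) = PySem.List.insertBy before x l ++ t := by
  induction l with
  | nil =>
    cases t with
    | nil => simp
    | cons y ys =>
      simp only [List.nil_append, PySem.List.insertBy, h y (by simp)]
      simp
  | cons z zs ih =>
    simp only [List.cons_append, PySem.List.insertBy]
    by_cases hz : before x z = true
    · simp [hz]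
    · simp only [Bool.not_eq_true] at hz
      simp [hz, ih]

-- insertBy only tests x against members of the list
theorem pv_insertBy_congr {α : Type} (f g : α → α → Bool) (x : α) (l : List α)
    (h : ∀ y ∈ l, f x y = g x y) :
    PySem.List.insertBy f x l = PySem.List.insertBy g x l := by
  induction l with
  | nil => rfl
  | cons z zs ih =>
    simp only [PySem.List.insertBy, h z (by simp)]
    rw [ih (fun y hy => h y (by simp [hy]))]

-- the lexicographic `before` used by sorted2 (reverse = false), for Nat first keys
def pvLex {α : Type} (rk : α → Nat) (ck : α → String) (a b : α) : Bool :=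
  decide (rk a < rk b) || !decide (rk b < rk a) && decide (ck a < ck b)

def pvCkLt {α : Type} (ck : α → String) (a b : α) : Bool := decide (ck a < ck b)

theorem pv_sorted2_eq_foldl {α : Type} (rk : α → Nat) (ck : α → String) (xs : List α) :
    PySem.List.sorted2 xs rk ck false
      = xs.foldl (fun acc x => PySem.List.insertBy (pvLex rk ck) x acc) [] := rfl

theorem pv_sorted_eq_foldl {α : Type} (ck : α → String) (xs : List α) :
    PySem.List.sorted xs ck false
      = xs.foldl (fun acc x => PySem.List.insertBy (pvCkLt ck) x acc) [] := rfl

-- buckets: for each rank value r in rs, the tasks of rank r sorted by created only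
def pvBuckets {α : Type} (rk : α → Nat) (ck : α → String) (rs : List Nat) (xs : List α) : List α :=
  rs.flatMap (fun r => PySem.List.sorted (xs.filter (fun t => rk t == r)) ck false)

theorem pv_sorted_append_singleton {α : Type} (ck : α → String) (xs : List α) (x : α) :
    PySem.List.sorted (xs ++ [x]) ck false
      = PySem.List.insertBy (pvCkLt ck) x (PySem.List.sorted xs ck false) := by
  rw [pv_sorted_eq_foldl, pv_sorted_eq_foldl, List.foldl_append]
  rfl

theorem pv_mem_bucket {α : Type} (rk : α → Nat) (ck : α → String) (r : Nat) (xs : List α)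
    (y : α) (hy : y ∈ PySem.List.sorted (xs.filter (fun t => rk t == r)) ck false) :
    rk y = r := by
  have := (PySem.List.mem_sorted (xs := xs.filter (fun t => rk t == r))
    (key := ck) (rev := false) (x := y)).mp hy
  have := List.of_mem_filter this
  simpa using this

theorem pv_mem_buckets {α : Type} (rk : α → Nat) (ck : α → String) (rs : List Nat) (xs : List α)
    (y : α) (hy : y ∈ pvBuckets rk ck rs xs) : rk y ∈ rs := by
  unfold pvBuckets at hy
  rw [List.mem_flatMap] at hy
  obtain ⟨r, hr, hyr⟩ := hy
  have := pv_mem_bucket rk ck r xs y hyr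
  rwa [this]

-- unfolding one bucket
theorem pvBuckets_cons {α : Type} (rk : α → Nat) (ck : α → String) (r : Nat) (rs : List Nat)
    (xs : List α) :
    pvBuckets rk ck (r :: rs) xs
      = PySem.List.sorted (xs.filter (fun t => rk t == r)) ck false ++ pvBuckets rk ck rs xs := by
  unfold pvBuckets
  simp [List.flatMap_cons]

-- appending an element whose rank is in none of the listed buckets changes nothing
theorem pvBuckets_append_ne {α : Type} (rk : α → Nat) (ck : α → String) (rs : List Nat)
    (xs : List α) (x : α) (h : ∀ r' ∈ rs, rk x ≠ r') :
    pvBuckets rk ck rs (xs ++ [x]) = pvBuckets rk ck rs xs := by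
  induction rs with
  | nil => rfl
  | cons r rs' ih =>
    rw [pvBuckets_cons, pvBuckets_cons, List.filter_append]
    have : rk x ≠ r := h r (by simp)
    simp only [List.filter_cons, List.filter_nil, beq_iff_eq, this, if_false, List.append_nil]
    rw [ih (fun r' hr' => h r' (by simp [hr']))]

-- inserting one element into the bucket decomposition
theorem pv_insert_buckets {α : Type} (rk : α → Nat) (ck : α → String)
    (rs : List Nat) (hrs : rs.Pairwise (· < ·)) (xs : List α) (x : α) (hx : rk x ∈ rs) :
    PySem.List.insertBy (pvLex rk ck) x (pvBuckets rk ck rs xs)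
      = pvBuckets rk ck rs (xs ++ [x]) := by
  induction rs with
  | nil => cases hx
  | cons r rs' ih =>
    have hlt : ∀ r' ∈ rs', r < r' := (List.pairwise_cons.mp hrs).1
    have hrs' : rs'.Pairwise (· < ·) := (List.pairwise_cons.mp hrs).2
    rw [pvBuckets_cons, pvBuckets_cons]
    by_cases hr : rk x = r
    · -- x belongs to the head bucket; everything in later buckets has strictly larger rank
      have hpost : ∀ y ∈ pvBuckets rk ck rs' xs, pvLex rk ck x y = true := by
        intro y hy
        have hmem := pv_mem_buckets rk ck rs' xs y hy
        have : r < rk y := hlt _ hmem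
        simp [pvLex, hr, this]
      rw [pv_insertBy_append_right _ _ _ _ hpost]
      have hcongr : PySem.List.insertBy (pvLex rk ck) x
            (PySem.List.sorted (xs.filter (fun t => rk t == r)) ck false)
          = PySem.List.insertBy (pvCkLt ck) x
            (PySem.List.sorted (xs.filter (fun t => rk t == r)) ck false) := by
        apply pv_insertBy_congr
        intro y hy
        have : rk y = r := pv_mem_bucket rk ck r xs y hy
        simp [pvLex, pvCkLt, hr, this]
      rw [hcongr]
      have hfilter : (xs ++ [x]).filter (fun t => rk t == r)
          = xs.filter (fun t => rk t == r) ++ [x] := by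
        rw [List.filter_append]; simp [hr]
      have hrest : pvBuckets rk ck rs' (xs ++ [x]) = pvBuckets rk ck rs' xs := by
        apply pvBuckets_append_ne
        intro r' hr'
        have := hlt _ hr'; omega
      rw [hfilter, pv_sorted_append_singleton, hrest]
    · -- x belongs to a later bucket; head bucket elements have strictly smaller rank
      have hx' : rk x ∈ rs' := by
        cases List.mem_cons.mp hx with
        | inl h => exact absurd h hr
        | inr h => exact h
      have hpre : ∀ y ∈ PySem.List.sorted (xs.filter (fun t => rk t == r)) ck false,
          pvLex rk ck x y = false := by
        intro y hy
        have : rk y = r := pv_mem_bucket rk ck r xs y hy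
        have hgt : r < rk x := hlt _ hx'
        simp only [pvLex, this]
        simp
        omega
      rw [pv_insertBy_append_left _ _ _ _ hpre, ih hrs' hx']
      have : (xs ++ [x]).filter (fun t => rk t == r) = xs.filter (fun t => rk t == r) := by
        rw [List.filter_append]; simp [hr]
      rw [this]

-- main: the composite-key stable sort is the bucket decomposition
theorem pv_sorted2_eq_buckets {α : Type} (rk : α → Nat) (ck : α → String)
    (rs : List Nat) (hrs : rs.Pairwise (· < ·)) (xs : List α) (hx : ∀ x ∈ xs, rk x ∈ rs) :
    PySem.List.sorted2 xs rk ck false = pvBuckets rk ck rs xs := by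
  induction xs using List.reverseRecOn with
  | nil =>
    unfold pvBuckets
    simp only [pv_sorted2_eq_foldl, List.foldl_nil]
    symm
    simp only [List.flatMap_eq_nil_iff]
    intro r _
    rfl
  | append_singleton ys x ih =>
    rw [pv_sorted2_eq_foldl, List.foldl_append]
    simp only [List.foldl_cons, List.foldl_nil]
    rw [← pv_sorted2_eq_foldl]
    rw [ih (fun y hy => hx y (by simp [hy]))]
    exact pv_insert_buckets rk ck rs hrs ys x (hx x (by simp))

-- pvRankA as an if-chain over the five known statuses
theorem pv_rank_val (t : List (String × String)) :
    pvRankA t =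
      (if PySem.Dict.getD ⟨t⟩ "status" "" == "paused" then 0
       else if PySem.Dict.getD ⟨t⟩ "status" "" == "in_progress" then 1
       else if PySem.Dict.getD ⟨t⟩ "status" "" == "review" then 2
       else if PySem.Dict.getD ⟨t⟩ "status" "" == "test" then 3
       else if PySem.Dict.getD ⟨t⟩ "status" "" == "pending" then 4
       else 99) := by
  unfold pvRankA
  generalize PySem.Dict.getD ⟨t⟩ "status" "" = s
  by_cases h0 : s = "paused"
  · subst h0; decide
  by_cases h1 : s = "in_progress"
  · subst h1; decide
  by_cases h2 : s = "review"
  · subst h2; decide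
  by_cases h3 : s = "test"
  · subst h3; decide
  by_cases h4 : s = "pending"
  · subst h4; decide
  have hnone : PySem.List.index? pvStatusOrder s = none :=
    (PySem.List.index?_eq_none_iff _ _).mpr (by simp [pvStatusOrder, h0, h1, h2, h3, h4])
  rw [hnone]
  simp [h0, h1, h2, h3, h4]

-- pvRankA takes values in {0,…,4,99}
theorem pv_rank_mem (t : List (String × String)) : pvRankA t ∈ [0, 1, 2, 3, 4, 99] := by
  rw [pv_rank_val]
  split_ifs <;> simp

theorem pv_filter_rank (tasks : List (List (String × String))) (i : Nat) (st : String)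
    (h : ∀ t : List (String × String),
        (pvRankA t == i) = (PySem.Dict.getD ⟨t⟩ "status" "" == st)) :
    tasks.filter (fun t => pvRankA t == i)
      = tasks.filter (fun t => PySem.Dict.getD ⟨t⟩ "status" "" == st) :=
  List.filter_congr (fun t _ => h t)

theorem pv_rank_99 (t : List (String × String)) :
    (pvRankA t == 99) = !(pvStatusOrder.contains (PySem.Dict.getD ⟨t⟩ "status" "")) := by
  rw [pv_rank_val]
  unfold pvStatusOrder
  generalize PySem.Dict.getD ⟨t⟩ "status" "" = s
  split_ifs with h0 h1 h2 h3 h4 <;> simp_all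

-- the bucket decomposition is exactly B's ordered list
theorem pv_buckets_eq_orderedB (tasks : List (List (String × String))) :
    pvBuckets pvRankA pvCreatedA [0, 1, 2, 3, 4, 99] tasks = pvOrderedB tasks := by
  unfold pvOrderedB pvBucketB pvStatusOrder
  simp only [pvBuckets_cons, List.map_cons, List.map_nil, List.flatten_cons, List.flatten_nil,
    List.append_nil, List.append_assoc]
  rw [pv_filter_rank tasks 0 "paused"
        (fun t => by rw [pv_rank_val]; split_ifs <;> simp_all),
      pv_filter_rank tasks 1 "in_progress"
        (fun t => by rw [pv_rank_val]; split_ifs <;> simp_all),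
      pv_filter_rank tasks 2 "review"
        (fun t => by rw [pv_rank_val]; split_ifs <;> simp_all),
      pv_filter_rank tasks 3 "test"
        (fun t => by rw [pv_rank_val]; split_ifs <;> simp_all),
      pv_filter_rank tasks 4 "pending"
        (fun t => by rw [pv_rank_val]; split_ifs <;> simp_all)]
  have h99 : tasks.filter (fun t => pvRankA t == 99)
      = tasks.filter (fun t => !(pvStatusOrder.contains (PySem.Dict.getD ⟨t⟩ "status" ""))) :=
    List.filter_congr (fun t _ => pv_rank_99 t)
  rw [h99]
  unfold pvCreatedA pvCreatedB pvStatusOrder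
  simp [pvBuckets]

theorem pv_ordered_eq (tasks : List (List (String × String))) :
    PySem.List.sorted2 tasks pvRankA pvCreatedA false = pvOrderedB tasks := by
  rw [pv_sorted2_eq_buckets pvRankA pvCreatedA [0, 1, 2, 3, 4, 99]
        (by decide) tasks (fun x _ => pv_rank_mem x)]
  exact pv_buckets_eq_orderedB tasks

-- ===== VERDICT (by name: the statement is the Claim_ definition above) =====
theorem build_project_section_py_spec : Claim_equal_build_project_section_py := by
  intro project tasks _
  unfold Spec_build_project_section_py
  unfold build_project_section_py build_project_section_py_alt
  simp only [PySem.List.foldl_append_singleton_eq_map (f := pvRowA)]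
  rw [pv_ordered_eq]
  rfl
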